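-- pv_equiv track=rewrite | github.com/anand0906/DataStructures-Algorithms | Dynamic Programming/Problems/45.Longest Divisible Subset.py | algorithmic
-- ===== SOURCE A (Python) =====
-- def algorithmic(arr,n):
--     dp=[0]*n
--     for i in range(n):
--         dp[i]=1
--     for index in range(n):
--         for last_index in range(index):
--             if(arr[index]%arr[last_index]==0):
--                 temp=1+dp[last_index]
--                 dp[index]=max(dp[index],temp)
--     final=-1
--     for i in dp:
--         final=max(final,i)
--     return final
-- ===== SOURCE B (Python) =====
-- def algorithmic(arr, n):
--     # Value -> best chain length dict; for each element enumerate the divisors of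
--     # its absolute value (in O(sqrt|v|)) to find the best predecessor chain.
--     best = {}      # value -> longest divisible chain (in index order) ending at that value
--     best_any = 0   # max of best.values() (0 while empty)
--     final = -1
--     for v in arr[:max(n, 0)]:
--         if v == 0:
--             cur = 1 + best_any   # every previous value divides 0
--         else:
--             a = abs(v)
--             cur = 1
--             d = 1
--             while d * d <= a:
--                 if a % d == 0:
--                     e = a // d
--                     for k in (d, -d, e, -e):
--                         m = best.get(k)
--                         if m is not None and m + 1 > cur:
--                             cur = m + 1
--                 d += 1
--         if best.get(v, 0) < cur:
--             best[v] = cur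
--         if best_any < cur:
--             best_any = cur
--         if final < cur:
--             final = cur
--     return final
-- ===== Notes on version B (the rewrite author's own statement) =====
-- stated objective: faster
-- what changed: A's O(n^2) nested predecessor scan over all earlier indices is replaced by a value-keyed best-chain dict where each element finds its best predecessor by enumerating the divisors of |v| in O(sqrt|v|) (zero takes the running maximum, since everything divides 0), so the inner index scan disappears.
-- intended difference: On arr=[] with n=1 A returns 1 (its dp table has one slot although the list has no element), B returns -1 as for every other empty selection, which is the intended answer for an empty input. — e.g. on algorithmic([], 1): A returns 1, B returns -1
import Mathlib
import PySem

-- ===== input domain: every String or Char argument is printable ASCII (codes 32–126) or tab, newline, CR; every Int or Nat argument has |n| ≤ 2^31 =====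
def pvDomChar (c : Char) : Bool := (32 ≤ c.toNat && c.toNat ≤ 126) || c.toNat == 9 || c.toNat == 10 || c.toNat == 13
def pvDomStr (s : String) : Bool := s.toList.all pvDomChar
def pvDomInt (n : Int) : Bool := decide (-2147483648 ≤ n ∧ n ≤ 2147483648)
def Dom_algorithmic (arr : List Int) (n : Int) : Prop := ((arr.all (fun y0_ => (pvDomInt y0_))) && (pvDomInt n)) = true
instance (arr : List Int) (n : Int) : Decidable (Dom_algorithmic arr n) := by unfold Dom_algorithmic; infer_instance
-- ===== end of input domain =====

-- B replaces A's O(n^2) nested predecessor scan by a value-keyed best-chain dict in which each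
-- element finds its best predecessor by enumerating the divisors of |v| (zero takes the running
-- maximum, since every value divides 0); equivalence is about the return value only.

-- ===== PORT A =====
def algorithmic (arr : List Int) (n : Int) : Int :=
  -- dp=[0]*n
  let dp := PySem.List.pyRepeat [(0 : Int)] n
  -- for i in range(n): dp[i]=1
  let dp := (PySem.List.pyRange 0 n 1).foldl (fun dp i => PySem.List.pySetD dp i 1) dp
  -- for index in range(n): for last_index in range(index): …
  let dp := (PySem.List.pyRange 0 n 1).foldl (fun dp index =>
    (PySem.List.pyRange 0 index 1).foldl (fun dp last_index =>
      if PySem.Int.mod (PySem.List.pyGetD arr index 0) (PySem.List.pyGetD arr last_index 0) == 0 then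
        let temp := 1 + PySem.List.pyGetD dp last_index 0
        PySem.List.pySetD dp index (max (PySem.List.pyGetD dp index 0) temp)
      else dp) dp) dp
  -- final=-1; for i in dp: final=max(final,i)
  dp.foldl (fun final i => max final i) (-1)

-- ===== PORT B =====
-- the `while d * d <= a:` divisor-enumeration loop of Source B (a = abs(v), d starts at 1)
def bDivScan (best : PySem.Dict Int Int) (a : Nat) (d : Nat) (cur : Int) : Int :=
  if d * d ≤ a then
    let cur :=
      if a % d == 0 then
        let e := a / d
        -- for k in (d, -d, e, -e): m = best.get(k); if m is not None and m + 1 > cur: cur = m + 1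
        [(d : Int), -(d : Int), (e : Int), -(e : Int)].foldl (fun cur k =>
          match best.get? k with
          | some m => if cur < m + 1 then m + 1 else cur
          | none => cur) cur
      else cur
    bDivScan best a (d + 1) cur
  else cur
termination_by a + 1 - d
decreasing_by
  rcases Nat.eq_zero_or_pos d with h0 | h1
  · omega
  · have : d ≤ d * d := Nat.le_mul_of_pos_left d h1
    omega

-- one iteration of Source B's main loop over the state (best, best_any, final)
def bStep (st : PySem.Dict Int Int × Int × Int) (v : Int) : PySem.Dict Int Int × Int × Int :=
  let cur := if v == 0 then 1 + st.2.1 else bDivScan st.1 v.natAbs 1 1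
  let best := if st.1.getD v 0 < cur then st.1.insert v cur else st.1
  let best_any := if st.2.1 < cur then cur else st.2.1
  let final := if st.2.2 < cur then cur else st.2.2
  (best, best_any, final)

def algorithmic_alt (arr : List Int) (n : Int) : Int :=
  -- for v in arr[:max(n, 0)]: …
  ((PySem.List.slice arr none (some (max n 0))).foldl bStep (PySem.Dict.empty, 0, -1)).2.2

-- ===== PRECONDITION & SPEC =====
-- Pre_ excludes exactly the inputs where A raises: n ≥ 2 with fewer than n elements (IndexError),
-- and a zero among the first n-1 elements (ZeroDivisionError).
def Pre_algorithmic (arr : List Int) (n : Int) : Prop :=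
  (n ≤ (arr.length : Int) ∨ n ≤ 1) ∧ ∀ x ∈ arr.take (n.toNat - 1), x ≠ 0
instance (arr : List Int) (n : Int) : Decidable (Pre_algorithmic arr n) := by
  unfold Pre_algorithmic; infer_instance
def pvWitness_algorithmic : List Int × Int := ([1, 2, 3, 6, 0], 5)

-- On arr=[] with n=1 A returns 1 (its dp table has one slot although the list has no element);
-- B returns -1 as for every other empty selection, the intended answer for an empty input.
def D_algorithmic (arr : List Int) (n : Int) : Prop := arr = [] ∧ n = 1
instance (arr : List Int) (n : Int) : Decidable (D_algorithmic arr n) := by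
  unfold D_algorithmic; infer_instance

def Spec_algorithmic (arr : List Int) (n : Int) (out : Int) : Prop :=
  ¬ D_algorithmic arr n → out = algorithmic_alt arr n
instance (arr : List Int) (n : Int) (out : Int) : Decidable (Spec_algorithmic arr n out) := by
  unfold Spec_algorithmic; infer_instance

def pvDiffWitness_algorithmic : List Int × Int := ([], 1)
def pvDiffWitnessOut_algorithmic : Int × Int := (1, -1)

-- ===== CLAIM (what is proved, stated in full; the proofs are below) =====
def Claim_unchanged_algorithmic : Prop := ∀ (arr : List Int) (n : Int), Dom_algorithmic arr n → Pre_algorithmic arr n → Spec_algorithmic arr n (algorithmic arr n)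
def Claim_changed_algorithmic : Prop := Dom_algorithmic (pvDiffWitness_algorithmic.1) (pvDiffWitness_algorithmic.2) ∧ Pre_algorithmic (pvDiffWitness_algorithmic.1) (pvDiffWitness_algorithmic.2) ∧ D_algorithmic (pvDiffWitness_algorithmic.1) (pvDiffWitness_algorithmic.2) ∧ algorithmic (pvDiffWitness_algorithmic.1) (pvDiffWitness_algorithmic.2) = pvDiffWitnessOut_algorithmic.1 ∧ algorithmic_alt (pvDiffWitness_algorithmic.1) (pvDiffWitness_algorithmic.2) = pvDiffWitnessOut_algorithmic.2 ∧ pvDiffWitnessOut_algorithmic.1 ≠ pvDiffWitnessOut_algorithmic.2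
def Claim_exact_algorithmic : Prop := ∀ (arr : List Int) (n : Int), Dom_algorithmic arr n → Pre_algorithmic arr n → D_algorithmic arr n → algorithmic arr n ≠ algorithmic_alt arr n

-- ===== LEMMAS AND PROOFS =====

-- reference computation: one left-to-right pass collecting (value, chain-length) pairs
def chainStep (v : Int) (c : Int) (pd : Int × Int) : Int :=
  if PySem.Int.mod v pd.1 == 0 then max c (1 + pd.2) else c

def chainL (v : Int) (s : List (Int × Int)) : Int := s.foldl (chainStep v) 1

def seenOf (l : List Int) : List (Int × Int) :=
  l.foldl (fun s v => s ++ [(v, chainL v s)]) []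

def dpsOf (l : List Int) : List Int := (seenOf l).map Prod.snd

-- max chain length among pairs of s whose value is k (0 if none)
def dmax (s : List (Int × Int)) (k : Int) : Int :=
  s.foldl (fun c pd => if pd.1 == k then max c pd.2 else c) 0

-- ---- generic facts about conditional-max folds (the shape of every loop here) ----

theorem gfold_init_le (p : Int × Int → Bool) (f : Int × Int → Int) (t : List (Int × Int)) (c : Int) :
    c ≤ t.foldl (fun c pd => if p pd then max c (f pd) else c) c := by
  rw [PySem.List.foldl_if_eq_foldl_filter]
  exact (PySem.List.le_foldl_max_int (t.filter p) f c).1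

theorem gfold_mem_le (p : Int × Int → Bool) (f : Int × Int → Int) (t : List (Int × Int)) (c : Int)
    (pd : Int × Int) (hmem : pd ∈ t) (hp : p pd = true) :
    f pd ≤ t.foldl (fun c pd => if p pd then max c (f pd) else c) c := by
  rw [PySem.List.foldl_if_eq_foldl_filter]
  exact (PySem.List.le_foldl_max_int (t.filter p) f c).2 pd (List.mem_filter.mpr ⟨hmem, hp⟩)

theorem gfold_reached (p : Int × Int → Bool) (f : Int × Int → Int) (t : List (Int × Int)) (c : Int) :
    t.foldl (fun c pd => if p pd then max c (f pd) else c) c = c ∨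
      ∃ pd ∈ t, p pd = true ∧ t.foldl (fun c pd => if p pd then max c (f pd) else c) c = f pd := by
  induction t generalizing c with
  | nil => exact Or.inl rfl
  | cons pd t ih =>
    simp only [List.foldl_cons]
    by_cases hp : p pd = true
    · simp only [hp, if_true]
      rcases ih (max c (f pd)) with h | ⟨q, hq, hpq, hval⟩
      · rcases max_choice c (f pd) with hm | hm
        · exact Or.inl (h.trans hm)
        · exact Or.inr ⟨pd, List.mem_cons_self, hp, h.trans hm⟩
      · exact Or.inr ⟨q, List.mem_cons_of_mem _ hq, hpq, hval⟩
    · simp only [hp]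
      rcases ih c with h | ⟨q, hq, hpq, hval⟩
      · exact Or.inl h
      · exact Or.inr ⟨q, List.mem_cons_of_mem _ hq, hpq, hval⟩

-- chainL is such a fold
theorem chainStep_eq (v : Int) :
    chainStep v = fun c pd => if (PySem.Int.mod v pd.1 == 0 : Bool) then max c (1 + pd.2) else c := by
  funext c pd; rfl

theorem chainL_init_le (v : Int) (t : List (Int × Int)) (c : Int) : c ≤ t.foldl (chainStep v) c := by
  rw [chainStep_eq]; exact gfold_init_le _ _ t c

theorem chainL_mem_le (v : Int) (t : List (Int × Int)) (c : Int) (pd : Int × Int)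
    (hmem : pd ∈ t) (hp : (PySem.Int.mod v pd.1 == 0) = true) :
    1 + pd.2 ≤ t.foldl (chainStep v) c := by
  rw [chainStep_eq]; exact gfold_mem_le _ _ t c pd hmem hp

theorem chainL_reached (v : Int) (t : List (Int × Int)) (c : Int) :
    t.foldl (chainStep v) c = c ∨
      ∃ pd ∈ t, (PySem.Int.mod v pd.1 == 0) = true ∧ t.foldl (chainStep v) c = 1 + pd.2 := by
  rw [chainStep_eq]; exact gfold_reached _ _ t c

theorem one_le_chainL (v : Int) (s : List (Int × Int)) : 1 ≤ chainL v s := chainL_init_le v s 1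

-- dmax is such a fold (with init 0)
theorem dmax_mem_le (s : List (Int × Int)) (pd : Int × Int) (hmem : pd ∈ s) :
    pd.2 ≤ dmax s pd.1 :=
  gfold_mem_le _ _ s 0 pd hmem (by simp)

theorem dmax_reached (s : List (Int × Int)) (k : Int) :
    dmax s k = 0 ∨ ∃ pd ∈ s, pd.1 = k ∧ dmax s k = pd.2 := by
  rcases gfold_reached (fun pd => pd.1 == k) (fun pd => pd.2) s 0 with h | ⟨pd, hm, hp, hv⟩
  · exact Or.inl h
  · exact Or.inr ⟨pd, hm, by simpa using hp, hv⟩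

theorem dmax_append (s : List (Int × Int)) (pd : Int × Int) (k : Int) :
    dmax (s ++ [pd]) k = if pd.1 = k then max (dmax s k) pd.2 else dmax s k := by
  simp only [dmax, List.foldl_append, List.foldl_cons, List.foldl_nil]
  by_cases h : pd.1 = k <;> simp [h]

-- ---- facts about the reference pass ----

theorem seenOf_append (l : List Int) (v : Int) :
    seenOf (l ++ [v]) = seenOf l ++ [(v, chainL v (seenOf l))] := by
  simp [seenOf, List.foldl_append]

theorem length_seenOf (l : List Int) : (seenOf l).length = l.length := by
  induction l using List.reverseRecOn with
  | nil => rfl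
  | append_singleton l v ih => simp [seenOf_append, ih]

theorem fst_seenOf (l : List Int) : (seenOf l).map Prod.fst = l := by
  induction l using List.reverseRecOn with
  | nil => rfl
  | append_singleton l v ih => simp [seenOf_append, ih]

theorem dpsOf_append (l : List Int) (v : Int) :
    dpsOf (l ++ [v]) = dpsOf l ++ [chainL v (seenOf l)] := by
  simp [dpsOf, seenOf_append]

theorem one_le_snd_seenOf (l : List Int) (pd : Int × Int) (h : pd ∈ seenOf l) : 1 ≤ pd.2 := by
  induction l using List.reverseRecOn with
  | nil => simp [seenOf] at h
  | append_singleton l v ih =>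
    rw [seenOf_append] at h
    rcases List.mem_append.mp h with h | h
    · exact ih h
    · simp only [List.mem_singleton] at h
      subst h
      exact one_le_chainL v (seenOf l)

-- ---- A-side: the index loops compute the reference pass ----

theorem set_at_append_length {a : Type} (l1 l2 : List a) (v : a) :
    (l1 ++ l2).set l1.length v = l1 ++ l2.set 0 v := by
  simp

-- the initialisation loop turns a prefix of the list into ones
theorem setall_loop (k : Nat) (c : List Int) (hk : k ≤ c.length) :
    (PySem.List.pyRange 0 (k : Int) 1).foldl (fun dp i => PySem.List.pySetD dp i (1 : Int)) c
      = List.replicate k 1 ++ c.drop k := by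
  induction k with
  | zero => simp [PySem.List.pyRange_one_eq_nil]
  | succ k ih =>
    have hk' : k ≤ c.length := Nat.le_of_succ_le hk
    have hcast : ((k + 1 : Nat) : Int) = (k : Int) + 1 := by push_cast; ring
    rw [hcast, PySem.List.pyRange_one_succ_right (by positivity), List.foldl_append, ih hk']
    simp only [List.foldl_cons, List.foldl_nil, PySem.List.pySetD_natCast]
    rw [List.drop_eq_getElem_cons (by omega : k < c.length)]
    have h2 : ∀ (x : Int) (rest : List Int),
        (List.replicate k (1 : Int) ++ x :: rest).set k 1 = List.replicate k (1 : Int) ++ 1 :: rest := by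
      intro x rest
      simpa only [List.length_replicate, List.set_cons_zero] using set_at_append_length (List.replicate k (1 : Int)) (x :: rest) 1
    rw [h2]
    simp [List.replicate_succ' (n := k)]

-- one inner loop: only cell `pre.length` is written, cells j < pre.length are read
theorem inner_loop (P : Int → Bool) (m : Nat) (pre suf : List Int) (c : Int) (hm : m ≤ pre.length) :
    (PySem.List.pyRange 0 (m : Int) 1).foldl
      (fun dp j => if P j then
          PySem.List.pySetD dp ((pre.length : Nat) : Int)
            (max (PySem.List.pyGetD dp ((pre.length : Nat) : Int) 0) (1 + PySem.List.pyGetD dp j 0))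
        else dp)
      (pre ++ c :: suf)
    = pre ++ ((PySem.List.pyRange 0 (m : Int) 1).foldl
        (fun acc j => if P j then max acc (1 + PySem.List.pyGetD pre j 0) else acc) c) :: suf := by
  induction m generalizing c with
  | zero => simp [PySem.List.pyRange_one_eq_nil]
  | succ m ih =>
    have hm' : m ≤ pre.length := Nat.le_of_succ_le hm
    have hcast : ((m + 1 : Nat) : Int) = (m : Int) + 1 := by push_cast; ring
    rw [hcast, PySem.List.pyRange_one_succ_right (by positivity), List.foldl_append,
      List.foldl_append, ih c hm']
    set cm := (PySem.List.pyRange 0 (m : Int) 1).foldl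
        (fun acc j => if P j then max acc (1 + PySem.List.pyGetD pre j 0) else acc) c with hcm
    simp only [List.foldl_cons, List.foldl_nil]
    by_cases hP : P (m : Int) = true
    · simp only [hP, if_true]
      have hget_mid : PySem.List.pyGetD (pre ++ cm :: suf) ((pre.length : Nat) : Int) 0 = cm := by
        rw [PySem.List.pyGetD_natCast]
        simp [List.getD]
      have hget_left : PySem.List.pyGetD (pre ++ cm :: suf) ((m : Nat) : Int) 0
          = PySem.List.pyGetD pre ((m : Nat) : Int) 0 := by
        rw [PySem.List.pyGetD_natCast, PySem.List.pyGetD_natCast]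
        simp [List.getD, List.getElem?_append_left (by omega : m < pre.length)]
      have hset_mid : ∀ w : Int, PySem.List.pySetD (pre ++ cm :: suf) ((pre.length : Nat) : Int) w
          = pre ++ w :: suf := by
        intro w
        rw [PySem.List.pySetD_natCast]
        simp
      simp only [hget_mid, hget_left, hset_mid]
    · rw [if_neg hP, if_neg hP]

-- evaluating the inner value-fold over indices as the structural chain fold
theorem chain_fold_eval (arr : List Int) (v : Int) (s : List (Int × Int)) (c : Int)
    (hget : ∀ j : Nat, j < s.length →
      PySem.List.pyGetD arr ((j : Nat) : Int) 0 = (s.map Prod.fst).getD j 0) :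
    (PySem.List.pyRange 0 ((s.length : Nat) : Int) 1).foldl
      (fun acc j => if PySem.Int.mod v (PySem.List.pyGetD arr j 0) == 0 then
          max acc (1 + PySem.List.pyGetD (s.map Prod.snd) j 0) else acc) c
    = s.foldl (chainStep v) c := by
  induction s using List.reverseRecOn generalizing c with
  | nil => simp [PySem.List.pyRange_one_eq_nil]
  | append_singleton s pd ih =>
    have hlen : (((s ++ [pd]).length : Nat) : Int) = ((s.length : Nat) : Int) + 1 := by
      simp
    rw [hlen, PySem.List.pyRange_one_succ_right (by positivity), List.foldl_append,
      List.foldl_append]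
    have hget' : ∀ j : Nat, j < s.length →
        PySem.List.pyGetD arr ((j : Nat) : Int) 0 = (s.map Prod.fst).getD j 0 := by
      intro j hj
      rw [hget j (by simp; omega)]
      simp [List.getD, List.getElem?_append_left (by simpa using hj : j < (s.map Prod.fst).length)]
    have hsnd : ∀ j : Nat, j < s.length →
        PySem.List.pyGetD ((s ++ [pd]).map Prod.snd) ((j : Nat) : Int) 0
          = PySem.List.pyGetD (s.map Prod.snd) ((j : Nat) : Int) 0 := by
      intro j hj
      rw [PySem.List.pyGetD_natCast, PySem.List.pyGetD_natCast]
      simp [List.getD, List.getElem?_append_left (by simpa using hj : j < (s.map Prod.snd).length)]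
    have hstep : ∀ acc : Int,
        (if PySem.Int.mod v (PySem.List.pyGetD arr ((s.length : Nat) : Int) 0) == 0 then
          max acc (1 + PySem.List.pyGetD ((s ++ [pd]).map Prod.snd) ((s.length : Nat) : Int) 0)
          else acc) = chainStep v acc pd := by
      intro acc
      have h1 : PySem.List.pyGetD arr ((s.length : Nat) : Int) 0 = pd.1 := by
        rw [hget s.length (by simp)]
        simp [List.getD]
      have h2 : PySem.List.pyGetD ((s ++ [pd]).map Prod.snd) ((s.length : Nat) : Int) 0 = pd.2 := by
        rw [PySem.List.pyGetD_natCast]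
        simp [List.getD]
      rw [h1, h2]; rfl
    have hfun : ∀ (acc x : Int), x ∈ PySem.List.pyRange 0 ((s.length : Nat) : Int) 1 →
        (if PySem.Int.mod v (PySem.List.pyGetD arr x 0) == 0 then
          max acc (1 + PySem.List.pyGetD ((s ++ [pd]).map Prod.snd) x 0) else acc)
        = (if PySem.Int.mod v (PySem.List.pyGetD arr x 0) == 0 then
          max acc (1 + PySem.List.pyGetD (s.map Prod.snd) x 0) else acc) := by
      intro acc x hx
      rcases (PySem.List.mem_pyRange_one).mp hx with ⟨hx0, hxlt⟩
      have hxj : x = ((x.toNat : Nat) : Int) := by omega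
      rw [hxj, hsnd x.toNat (by omega)]
    rw [PySem.List.foldl_congr_mem _ _ _ _ hfun, ih c hget']
    simp only [List.foldl_cons, List.foldl_nil]
    rw [hstep]

-- the whole double loop computes the reference pass on the first k elements
theorem outer_loop (arr : List Int) (N : Nat) (hN : N ≤ arr.length) (k : Nat) (hk : k ≤ N) :
    (PySem.List.pyRange 0 (k : Int) 1).foldl
      (fun dp index => (PySem.List.pyRange 0 index 1).foldl
        (fun dp last_index =>
          if PySem.Int.mod (PySem.List.pyGetD arr index 0) (PySem.List.pyGetD arr last_index 0) == 0 then
            PySem.List.pySetD dp index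
              (max (PySem.List.pyGetD dp index 0) (1 + PySem.List.pyGetD dp last_index 0))
          else dp) dp)
      (List.replicate N 1)
    = dpsOf (arr.take k) ++ List.replicate (N - k) 1 := by
  induction k with
  | zero => simp [PySem.List.pyRange_one_eq_nil, dpsOf, seenOf]
  | succ k ih =>
    have hk' : k ≤ N := Nat.le_of_succ_le hk
    have hcast : ((k + 1 : Nat) : Int) = (k : Int) + 1 := by push_cast; ring
    rw [hcast, PySem.List.pyRange_one_succ_right (by positivity), List.foldl_append, ih hk']
    simp only [List.foldl_cons, List.foldl_nil]
    have hpre : (dpsOf (arr.take k)).length = k := by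
      simp [dpsOf, length_seenOf]
      omega
    have hrep : List.replicate (N - k) (1 : Int) = 1 :: List.replicate (N - (k+1)) 1 := by
      have : N - k = (N - (k+1)) + 1 := by omega
      rw [this, List.replicate_succ]
    rw [hrep]
    have H := inner_loop
      (fun j => PySem.Int.mod (PySem.List.pyGetD arr (k : Int) 0) (PySem.List.pyGetD arr j 0) == 0)
      k (dpsOf (arr.take k)) (List.replicate (N - (k+1)) 1) 1 (by omega)
    rw [hpre] at H
    rw [H]
    have hs : (seenOf (arr.take k)).length = k := by
      rw [length_seenOf]; simp; omega
    have hget : ∀ j : Nat, j < (seenOf (arr.take k)).length →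
        PySem.List.pyGetD arr ((j : Nat) : Int) 0
          = ((seenOf (arr.take k)).map Prod.fst).getD j 0 := by
      intro j hj
      rw [fst_seenOf, PySem.List.pyGetD_natCast]
      rw [hs] at hj
      simp [List.getD, hj]
    have HC := chain_fold_eval arr (PySem.List.pyGetD arr (k : Int) 0) (seenOf (arr.take k)) 1 hget
    rw [hs] at HC
    have hsnd : (seenOf (arr.take k)).map Prod.snd = dpsOf (arr.take k) := rfl
    rw [hsnd] at HC
    rw [HC]
    have htake : arr.take (k+1) = arr.take k ++ [arr[k]'(by omega)] := by
      rw [List.take_add_one]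
      have : arr[k]? = some (arr[k]'(by omega)) := List.getElem?_eq_getElem (by omega)
      rw [this]
      rfl
    have hvk : PySem.List.pyGetD arr (k : Int) 0 = arr[k]'(by omega) := by
      rw [PySem.List.pyGetD_natCast]
      simp [List.getD, List.getElem?_eq_getElem (by omega : k < arr.length)]
    rw [htake, dpsOf_append, hvk]
    simp [chainL]

theorem A_eq_ref (arr : List Int) (n : Int) (h0 : 0 ≤ n) (hlen : n ≤ (arr.length : Int)) :
    algorithmic arr n = (dpsOf (arr.take n.toNat)).foldl (fun a b => max a b) (-1) := by
  have hn : n = ((n.toNat : Nat) : Int) := (Int.toNat_of_nonneg h0).symm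
  have hNlen : n.toNat ≤ arr.length := by omega
  rw [algorithmic, hn, PySem.List.pyRepeat_singleton]
  simp only [Int.toNat_natCast]
  rw [setall_loop n.toNat (List.replicate n.toNat 0) (by simp)]
  rw [List.drop_replicate]
  simp only [Nat.sub_self, List.replicate_zero, List.append_nil]
  rw [outer_loop arr n.toNat hNlen n.toNat (Nat.le_refl _)]
  simp

-- ---- B-side: divisor enumeration finds exactly the predecessors A's inner scan finds ----

-- the inner `for k in (d, -d, e, -e)` lookup-and-max step of Source B
def getStep (best : PySem.Dict Int Int) (cur : Int) (k : Int) : Int :=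
  match best.get? k with
  | some m => if cur < m + 1 then m + 1 else cur
  | none => cur

theorem getStep_le (best : PySem.Dict Int Int) (cur k : Int) : cur ≤ getStep best cur k := by
  unfold getStep
  rcases h : best.get? k with _ | m
  · exact le_refl _
  · split <;> omega

theorem getStep_some_le (best : PySem.Dict Int Int) (cur k m : Int)
    (hm : best.get? k = some m) : m + 1 ≤ getStep best cur k := by
  simp only [getStep, hm]
  split <;> omega

theorem gfoldl_le (best : PySem.Dict Int Int) (ks : List Int) (cur : Int) :
    cur ≤ ks.foldl (getStep best) cur := by
  induction ks generalizing cur with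
  | nil => exact le_refl _
  | cons k ks ih => exact le_trans (getStep_le best cur k) (ih _)

theorem gfoldl_mem_le (best : PySem.Dict Int Int) (ks : List Int) :
    ∀ (cur k m : Int), k ∈ ks → best.get? k = some m → m + 1 ≤ ks.foldl (getStep best) cur := by
  induction ks with
  | nil => intro cur k m hk _; simp at hk
  | cons k' ks ih =>
    intro cur k m hk hm
    rcases List.mem_cons.mp hk with h | h
    · subst h
      exact le_trans (getStep_some_le best cur k m hm) (gfoldl_le best ks _)
    · exact ih _ k m h hm

theorem gfoldl_reached (best : PySem.Dict Int Int) (ks : List Int) :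
    ∀ cur : Int, ks.foldl (getStep best) cur = cur ∨
      ∃ k ∈ ks, ∃ m, best.get? k = some m ∧ ks.foldl (getStep best) cur = m + 1 := by
  induction ks with
  | nil => intro cur; exact Or.inl rfl
  | cons k ks ih =>
    intro cur
    simp only [List.foldl_cons]
    rcases ih (getStep best cur k) with h | ⟨k', hk', m', hm', hv'⟩
    · rw [h]
      rcases hg : best.get? k with _ | m
      · exact Or.inl (by simp [getStep, hg])
      · simp only [getStep, hg]
        split
        · exact Or.inr ⟨k, List.mem_cons_self, m, hg, rfl⟩
        · exact Or.inl rfl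
    · exact Or.inr ⟨k', List.mem_cons_of_mem _ hk', m', hm', hv'⟩

-- the keys Source B's while-loop queries when started at counter d0
def VisitedFrom (a d0 : Nat) (k : Int) : Prop :=
  ∃ d : Nat, d0 ≤ d ∧ d * d ≤ a ∧ a % d = 0 ∧
    (k = (d : Int) ∨ k = -(d : Int) ∨ k = ((a / d : Nat) : Int) ∨ k = -((a / d : Nat) : Int))

-- the keys queried from the start d0 = 1 are exactly the nonzero divisors
theorem visited_iff (a : Nat) (ha : 1 ≤ a) (k : Int) :
    VisitedFrom a 1 k ↔ k ≠ 0 ∧ k ∣ (a : Int) := by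
  constructor
  · rintro ⟨d, hd1, hdd, hmod, hk⟩
    have hdvd : d ∣ a := Nat.dvd_of_mod_eq_zero hmod
    have hda : d ≤ a := le_trans (Nat.le_mul_of_pos_left d (by omega)) hdd
    have hq1 : 1 ≤ a / d := (Nat.one_le_div_iff (by omega)).mpr hda
    have h1 : ((d : Nat) : Int) ∣ (a : Int) := Int.natCast_dvd_natCast.mpr hdvd
    have h2 : ((a / d : Nat) : Int) ∣ (a : Int) :=
      Int.natCast_dvd_natCast.mpr (Nat.div_dvd_of_dvd hdvd)
    rcases hk with hk | hk | hk | hk <;> subst hk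
    · exact ⟨by omega, h1⟩
    · exact ⟨by omega, (Int.neg_dvd).mpr h1⟩
    · exact ⟨by omega, h2⟩
    · exact ⟨by omega, (Int.neg_dvd).mpr h2⟩
  · rintro ⟨hk0, hkdvd⟩
    have ht1 : 1 ≤ k.natAbs := by omega
    have htdvd : k.natAbs ∣ a := by
      simpa using Int.natAbs_dvd_natAbs.mpr hkdvd
    have hsk : k = (k.natAbs : Int) ∨ k = -(k.natAbs : Int) := Int.natAbs_eq k
    by_cases hts : k.natAbs * k.natAbs ≤ a
    · refine ⟨k.natAbs, ht1, hts, Nat.mod_eq_zero_of_dvd htdvd, ?_⟩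
      rcases hsk with h | h
      · exact Or.inl h
      · exact Or.inr (Or.inl h)
    · obtain ⟨c, hc⟩ := htdvd
      have hc1 : 1 ≤ c := by
        rcases Nat.eq_zero_or_pos c with h | h
        · subst h; omega
        · exact h
      have hct : c < k.natAbs := by
        have h1 : k.natAbs * c < k.natAbs * k.natAbs := by omega
        exact Nat.lt_of_mul_lt_mul_left h1
      have hcc : c * c ≤ a := by
        have h1 : c * c ≤ k.natAbs * c := Nat.mul_le_mul (le_of_lt hct) (le_refl c)
        omega
      have hadc : a / c = k.natAbs := by
        rw [hc, Nat.mul_div_cancel _ (by omega)]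
      refine ⟨c, hc1, hcc, Nat.mod_eq_zero_of_dvd ⟨k.natAbs, by rw [hc, Nat.mul_comm]⟩, ?_⟩
      rw [hadc]
      rcases hsk with h | h
      · exact Or.inr (Or.inr (Or.inl h))
      · exact Or.inr (Or.inr (Or.inr h))

-- one unfolding of the scan, with the inner fold written through getStep
theorem bDivScan_eq_step (best : PySem.Dict Int Int) (a d : Nat) (cur : Int) :
    bDivScan best a d cur =
      if d * d ≤ a then
        bDivScan best a (d + 1)
          (if a % d == 0 then
            [(d : Int), -(d : Int), ((a / d : Nat) : Int), -((a / d : Nat) : Int)].foldl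
              (getStep best) cur
          else cur)
      else cur := by
  rw [bDivScan]
  rfl

theorem bDivScan_le_aux (best : PySem.Dict Int Int) (a : Nat) :
    ∀ (N d : Nat) (cur : Int), a + 1 - d ≤ N → cur ≤ bDivScan best a d cur := by
  intro N
  induction N with
  | zero =>
    intro d cur hN
    have hdd : d ≤ d * d := Nat.le_mul_of_pos_left d (by omega)
    rw [bDivScan_eq_step, if_neg (by omega)]
  | succ N ih =>
    intro d cur hN
    rw [bDivScan_eq_step]
    by_cases h : d * d ≤ a
    · rw [if_pos h]
      refine le_trans ?_ (ih (d + 1) _ (by omega))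
      split
      · exact gfoldl_le best _ cur
      · exact le_refl _
    · rw [if_neg h]

theorem bDivScan_le (best : PySem.Dict Int Int) (a d : Nat) (cur : Int) :
    cur ≤ bDivScan best a d cur :=
  bDivScan_le_aux best a (a + 1 - d) d cur (le_refl _)

theorem bDivScan_visited_le_aux (best : PySem.Dict Int Int) (a : Nat) :
    ∀ (N d : Nat) (cur k m : Int), a + 1 - d ≤ N → VisitedFrom a d k →
      best.get? k = some m → m + 1 ≤ bDivScan best a d cur := by
  intro N
  induction N with
  | zero =>
    intro d cur k m hN hk _
    obtain ⟨d', hd1, hdd, _, _⟩ := hk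
    have : d' ≤ d' * d' := Nat.le_mul_of_pos_left d' (by omega)
    omega
  | succ N ih =>
    intro d cur k m hN hk hm
    obtain ⟨d', hd1, hdd, hmod, hks⟩ := hk
    have h : d * d ≤ a := le_trans (Nat.mul_le_mul hd1 hd1) hdd
    rw [bDivScan_eq_step, if_pos h]
    by_cases hde : d' = d
    · subst hde
      rw [if_pos (by simpa using hmod)]
      refine le_trans ?_ (bDivScan_le best a (d' + 1) _)
      refine gfoldl_mem_le best _ cur k m ?_ hm
      rcases hks with h' | h' | h' | h' <;> subst h' <;> simp
    · exact ih (d + 1) _ k m (by omega) ⟨d', by omega, hdd, hmod, hks⟩ hm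

theorem bDivScan_visited_le (best : PySem.Dict Int Int) (a d : Nat) (cur k m : Int)
    (hk : VisitedFrom a d k) (hm : best.get? k = some m) :
    m + 1 ≤ bDivScan best a d cur :=
  bDivScan_visited_le_aux best a (a + 1 - d) d cur k m (le_refl _) hk hm

theorem bDivScan_reached_aux (best : PySem.Dict Int Int) (a : Nat) :
    ∀ (N d : Nat) (cur : Int), a + 1 - d ≤ N →
      (bDivScan best a d cur = cur ∨
        ∃ k m, VisitedFrom a d k ∧ best.get? k = some m ∧ bDivScan best a d cur = m + 1) := by
  intro N
  induction N with
  | zero =>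
    intro d cur hN
    have hdd : d ≤ d * d := Nat.le_mul_of_pos_left d (by omega)
    rw [bDivScan_eq_step, if_neg (by omega)]
    exact Or.inl rfl
  | succ N ih =>
    intro d cur hN
    rw [bDivScan_eq_step]
    by_cases h : d * d ≤ a
    · rw [if_pos h]
      have hweak : ∀ k, VisitedFrom a (d + 1) k → VisitedFrom a d k := by
        rintro k ⟨d', hd1, hdd, hmod, hks⟩
        exact ⟨d', by omega, hdd, hmod, hks⟩
      rcases ih (d + 1) (if a % d == 0 then
          [(d : Int), -(d : Int), ((a / d : Nat) : Int), -((a / d : Nat) : Int)].foldl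
            (getStep best) cur else cur) (by omega) with hcur | ⟨k, m, hv, hm, hval⟩
      · rw [hcur]
        by_cases hb : (a % d == 0) = true
        · rw [if_pos hb]
          rcases gfoldl_reached best
              [(d : Int), -(d : Int), ((a / d : Nat) : Int), -((a / d : Nat) : Int)] cur with
            h0 | ⟨k, hkmem, m, hm, hv⟩
          · exact Or.inl h0
          · exact Or.inr ⟨k, m, ⟨d, le_refl d, h, by simpa using hb, by simpa using hkmem⟩, hm, hv⟩
        · rw [if_neg hb]
          exact Or.inl rfl
      · exact Or.inr ⟨k, m, hweak k hv, hm, hval⟩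
    · rw [if_neg h]
      exact Or.inl rfl

theorem bDivScan_reached (best : PySem.Dict Int Int) (a d : Nat) (cur : Int) :
    bDivScan best a d cur = cur ∨
      ∃ k m, VisitedFrom a d k ∧ best.get? k = some m ∧ bDivScan best a d cur = m + 1 :=
  bDivScan_reached_aux best a (a + 1 - d) d cur (le_refl _)

-- mod-as-divisibility, in the Bool form the chain fold uses
theorem mod_beq_iff (v k : Int) : (PySem.Int.mod v k == 0) = true ↔ k ∣ v := by
  rw [beq_iff_eq, PySem.Int.mod_eq_zero_iff_dvd]

-- for a nonzero element, the divisor scan equals A's predecessor maximum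
theorem scan_eq_chainL (v : Int) (hv : v ≠ 0) (best : PySem.Dict Int Int) (s : List (Int × Int))
    (hgd : ∀ k : Int, best.getD k 0 = dmax s k)
    (hpos : ∀ pd ∈ s, 1 ≤ pd.2) :
    bDivScan best v.natAbs 1 1 = chainL v s := by
  have ha : 1 ≤ v.natAbs := by omega
  apply le_antisymm
  · rcases bDivScan_reached best v.natAbs 1 1 with h | ⟨k, m, hvis, hm, hval⟩
    · rw [h]; exact one_le_chainL v s
    · rw [hval]
      obtain ⟨hk0, hkdvd⟩ := (visited_iff v.natAbs ha k).mp hvis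
      have hkv : k ∣ v := Int.dvd_natAbs.mp hkdvd
      have hmd : m = dmax s k := by
        have h' := PySem.Dict.getD_eq_get?_getD (d := best) (k := k) (d0 := (0 : Int))
        rw [hm] at h'
        simp at h'
        rw [hgd k] at h'
        omega
      rcases dmax_reached s k with h0 | ⟨pd, hpm, hpk, hpd⟩
      · rw [hmd, h0]
        exact one_le_chainL v s
      · have := chainL_mem_le v s 1 pd hpm ((mod_beq_iff v pd.1).mpr (hpk ▸ hkv))
        rw [hmd, hpd]
        unfold chainL at this ⊢
        omega
  · rcases chainL_reached v s 1 with h | ⟨pd, hpm, hdvd, hval⟩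
    · rw [chainL, h]; exact bDivScan_le best v.natAbs 1 1
    · rw [chainL, hval]
      have hkdvd : pd.1 ∣ v := (mod_beq_iff v pd.1).mp hdvd
      have hk0 : pd.1 ≠ 0 := by
        intro h0
        rw [h0] at hkdvd
        exact hv (zero_dvd_iff.mp hkdvd)
      have hp1 : 1 ≤ pd.2 := hpos pd hpm
      have hle : pd.2 ≤ dmax s pd.1 := dmax_mem_le s pd hpm
      rcases hq : best.get? pd.1 with _ | w
      · exfalso
        have := PySem.Dict.getD_eq_get?_getD (d := best) (k := pd.1) (d0 := (0 : Int))
        rw [hq] at this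
        simp at this
        rw [hgd pd.1] at this
        omega
      · have hw : w = dmax s pd.1 := by
          have := PySem.Dict.getD_eq_get?_getD (d := best) (k := pd.1) (d0 := (0 : Int))
          rw [hq] at this
          simp at this
          rw [hgd pd.1] at this
          omega
        have hvis : VisitedFrom v.natAbs 1 pd.1 :=
          (visited_iff v.natAbs ha pd.1).mpr ⟨hk0, Int.dvd_natAbs.mpr hkdvd⟩
        have := bDivScan_visited_le best v.natAbs 1 1 pd.1 w hvis hq
        omega

-- for a zero element, every previous value divides it: the chain is 1 + the running maximum
theorem chainL_zero_aux (s : List (Int × Int)) :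
    ∀ c : Int, s.foldl (chainStep 0) (1 + c) = 1 + s.foldl (fun c pd => max c pd.2) c := by
  induction s with
  | nil => intro c; rfl
  | cons pd s ih =>
    intro c
    simp only [List.foldl_cons]
    have hcond : (PySem.Int.mod 0 pd.1 == 0) = true := (mod_beq_iff 0 pd.1).mpr (dvd_zero pd.1)
    have hstep : chainStep 0 (1 + c) pd = 1 + max c pd.2 := by
      unfold chainStep
      rw [hcond]
      simp only [if_true]
      rcases le_total c pd.2 with h | h
      · rw [max_eq_right h, max_eq_right (by omega)]
      · rw [max_eq_left h, max_eq_left (by omega)]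
    rw [hstep, ih (max c pd.2)]

theorem chainL_zero (s : List (Int × Int)) :
    chainL 0 s = 1 + s.foldl (fun c pd => max c pd.2) 0 := by
  have := chainL_zero_aux s 0
  simpa [chainL] using this

-- B's single pass: dict relation, running maximum, and final answer
theorem B_run (l : List Int) :
    (∀ k : Int, (l.foldl bStep (PySem.Dict.empty, 0, -1)).1.getD k 0 = dmax (seenOf l) k) ∧
    (l.foldl bStep (PySem.Dict.empty, 0, -1)).2.1
        = (seenOf l).foldl (fun c pd => max c pd.2) 0 ∧
    (l.foldl bStep (PySem.Dict.empty, 0, -1)).2.2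
        = (dpsOf l).foldl (fun a b => max a b) (-1) := by
  induction l using List.reverseRecOn with
  | nil =>
    refine ⟨fun k => by simp [dmax, seenOf], rfl, rfl⟩
  | append_singleton l v ih =>
    obtain ⟨hgd, hany, hfin⟩ := ih
    rw [List.foldl_append]
    simp only [List.foldl_cons, List.foldl_nil]
    set st := l.foldl bStep (PySem.Dict.empty, 0, -1) with hst
    have hcur : (if v == 0 then 1 + st.2.1 else bDivScan st.1 v.natAbs 1 1)
        = chainL v (seenOf l) := by
      by_cases hv : v = 0
      · subst hv
        rw [if_pos (by simp), hany, chainL_zero]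
      · rw [if_neg (by simpa using hv)]
        exact scan_eq_chainL v hv st.1 (seenOf l) hgd (one_le_snd_seenOf l)
    simp only [bStep, hcur]
    set cur := chainL v (seenOf l) with hcurdef
    refine ⟨?_, ?_, ?_⟩
    · intro k
      rw [seenOf_append, dmax_append, ← hcurdef]
      by_cases hkv : k = v
      · subst hkv
        have hh := hgd k
        by_cases hins : st.1.getD k 0 < cur
        · rw [if_pos hins, PySem.Dict.getD_insert, if_pos rfl, if_pos rfl,
            max_eq_right (by omega)]
        · rw [if_neg hins, if_pos rfl, max_eq_left (by omega)]
          exact hh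
      · have hne : ¬ ((v : Int) = k) := fun h => hkv h.symm
        by_cases hins : st.1.getD v 0 < cur
        · rw [if_pos hins, PySem.Dict.getD_insert, if_neg hkv, if_neg hne]
          exact hgd k
        · rw [if_neg hins, if_neg hne]
          exact hgd k
    · rw [seenOf_append, List.foldl_append]
      simp only [List.foldl_cons, List.foldl_nil]
      rw [hany, ← hcurdef]
      by_cases h2 : List.foldl (fun c pd => max c pd.2) 0 (seenOf l) < cur
      · rw [if_pos h2, max_eq_right (le_of_lt h2)]
      · rw [if_neg h2, max_eq_left (by omega)]
    · rw [dpsOf_append, List.foldl_append]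
      simp only [List.foldl_cons, List.foldl_nil]
      rw [hfin, ← hcurdef]
      by_cases h2 : List.foldl (fun a b => max a b) (-1) (dpsOf l) < cur
      · rw [if_pos h2, max_eq_right (le_of_lt h2)]
      · rw [if_neg h2, max_eq_left (by omega)]

theorem B_eq_ref (arr : List Int) (n : Int) (h0 : 0 ≤ n) :
    algorithmic_alt arr n = (dpsOf (arr.take n.toNat)).foldl (fun a b => max a b) (-1) := by
  have hmax : max n 0 = n := max_eq_left h0
  have hn : n = ((n.toNat : Nat) : Int) := (Int.toNat_of_nonneg h0).symm
  rw [algorithmic_alt, hmax, hn, PySem.List.slice_to_natCast]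
  exact (B_run (arr.take n.toNat)).2.2

theorem A_nonpos (arr : List Int) (n : Int) (h : n ≤ 0) : algorithmic arr n = -1 := by
  rw [algorithmic, PySem.List.pyRepeat_singleton, PySem.List.pyRange_one_eq_nil h]
  have : n.toNat = 0 := Int.toNat_of_nonpos h
  rw [this]
  rfl

theorem B_nonpos (arr : List Int) (n : Int) (h : n ≤ 0) : algorithmic_alt arr n = -1 := by
  rw [algorithmic_alt, max_eq_right h,
    show (0 : Int) = ((0 : Nat) : Int) from rfl, PySem.List.slice_to_natCast]
  rfl

-- ===== VERDICT (by name: the statement is the Claim_ definition above) =====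
theorem algorithmic_spec : Claim_unchanged_algorithmic := by
  intro arr n _hdom hpre
  unfold Spec_algorithmic
  intro hnd
  obtain ⟨hor, _⟩ := hpre
  by_cases h0 : 0 ≤ n
  · have hlen : n ≤ (arr.length : Int) := by
      rcases hor with h | h
      · exact h
      · have h01 : n = 0 ∨ n = 1 := by omega
        rcases h01 with h' | h'
        · subst h'; positivity
        · subst h'
          cases arr with
          | nil => exact absurd ⟨rfl, rfl⟩ hnd
          | cons x xs => simp
    rw [A_eq_ref arr n h0 hlen, B_eq_ref arr n h0]
  · rw [A_nonpos arr n (by omega), B_nonpos arr n (by omega)]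

theorem algorithmic_changed : Claim_changed_algorithmic := by
  unfold Claim_changed_algorithmic; decide

theorem algorithmic_tight : Claim_exact_algorithmic := by
  intro arr n _hdom _hpre hd
  obtain ⟨ha, hn⟩ := hd
  subst ha; subst hn
  decide
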